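-- pv_equiv track=rewrite | github.com/mo3taz1986/m8_agent_poc | leader_agent.py | _looks_like_stakeholder_requirement
-- ===== SOURCE A (Python) =====
-- STAKEHOLDER_SUBJECTS = (
--     "leadership", "leaders", "finance", "finance team", "product team",
--     "product managers", "operations", "operations team", "the business",
--     "business", "executives", "management", "the team", "our team",
--     "analytics team", "data team", "sales team", "marketing team",
--     "the org", "the organization",
-- )
--
-- STAKEHOLDER_NEED_VERBS = (
--     " needs ", " need ", " requires ", " require ", " wants ", " want ",
-- )
--
-- CAPABILITY_NOUNS = (
--     "visibility", "reporting", "dashboard", "dashboards", "report",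
--     "reports", "tracking", "insight", "insights", "monitoring", "metrics",
--     "kpis", "pipeline", "feed", "integration", "workflow", "extract",
--     "view", "dataset", "model", "scorecard", "analysis", "breakdown",
--     "summary", "access", "performance",
-- )
--
-- def _normalize(text: str) -> str:
--     return " ".join((text or "").lower().strip().split())
--
-- def _looks_like_stakeholder_requirement(text: str) -> bool:
--     normalized = _normalize(text)
--     if normalized.endswith("?"):
--         return False
--     question_starters = (
--         "what ", "how ", "why ", "when ", "where ", "who ", "which ",
--         "is ", "are ", "do ", "does ", "did ", "can ", "could ", "should ",
--         "would ", "will ",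
--     )
--     if any(normalized.startswith(qs) for qs in question_starters):
--         return False
--     for subject in STAKEHOLDER_SUBJECTS:
--         if not normalized.startswith(subject):
--             continue
--         remainder = normalized[len(subject):]
--         for verb in STAKEHOLDER_NEED_VERBS:
--             if not remainder.startswith(verb):
--                 continue
--             after_verb = remainder[len(verb):]
--             if any(cap in after_verb for cap in CAPABILITY_NOUNS):
--                 return True
--     return False
-- ===== SOURCE B (Python) =====
-- STAKEHOLDER_SUBJECTS = (
--     "leadership", "leaders", "finance", "finance team", "product team",
--     "product managers", "operations", "operations team", "the business",
--     "business", "executives", "management", "the team", "our team",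
--     "analytics team", "data team", "sales team", "marketing team",
--     "the org", "the organization",
-- )
--
-- CAPABILITY_NOUNS = (
--     "visibility", "reporting", "dashboard", "dashboards", "report",
--     "reports", "tracking", "insight", "insights", "monitoring", "metrics",
--     "kpis", "pipeline", "feed", "integration", "workflow", "extract",
--     "view", "dataset", "model", "scorecard", "analysis", "breakdown",
--     "summary", "access", "performance",
-- )
--
-- _QUESTION_WORDS = frozenset((
--     "what", "how", "why", "when", "where", "who", "which",
--     "is", "are", "do", "does", "did", "can", "could", "should",
--     "would", "will",
-- ))
--
-- _NEED_WORDS = frozenset(("needs", "need", "requires", "require", "wants", "want"))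
--
-- _SUBJECT_SET = frozenset(STAKEHOLDER_SUBJECTS)
--
--
-- def _looks_like_stakeholder_requirement(text: str) -> bool:
--     # Token-based scan: work on the word list instead of prefix-matching strings.
--     words = (text or "").lower().strip().split()
--     if not words or words[-1].endswith("?"):
--         return False
--     if len(words) >= 2 and words[0] in _QUESTION_WORDS:
--         return False
--     for j in range(1, len(words) - 1):
--         if words[j] in _NEED_WORDS and " ".join(words[:j]) in _SUBJECT_SET:
--             tail = " ".join(words[j + 1:])
--             if any(cap in tail for cap in CAPABILITY_NOUNS):
--                 return True
--     return False
-- ===== Notes on version B (the rewrite author's own statement) =====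
-- stated objective: alternative
-- what changed: A normalizes into one string and prefix-scans it with nested subject-loop and verb-loop plus slicing; B never builds the normalized string for matching: it splits into a word list once and runs a single loop over word positions, testing the word at j against a need-verb set, the joined words before j against the subject set, and capabilities against the joined tail.
import Mathlib
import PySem

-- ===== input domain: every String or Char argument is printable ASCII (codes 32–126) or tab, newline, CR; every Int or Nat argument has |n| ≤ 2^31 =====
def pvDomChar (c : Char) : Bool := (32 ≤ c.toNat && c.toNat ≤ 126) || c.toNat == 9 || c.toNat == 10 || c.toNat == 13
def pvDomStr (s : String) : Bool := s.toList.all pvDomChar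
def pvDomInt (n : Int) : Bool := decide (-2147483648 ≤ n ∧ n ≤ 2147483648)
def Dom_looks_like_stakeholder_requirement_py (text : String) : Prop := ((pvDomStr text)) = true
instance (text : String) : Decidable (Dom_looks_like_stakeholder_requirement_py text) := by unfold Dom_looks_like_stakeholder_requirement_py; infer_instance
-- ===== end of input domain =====

-- B replaces A's nested subject/verb prefix scanning over the normalized STRING by a
-- token-level algorithm: split into words once, then one loop over word positions with
-- set membership (alternative decomposition; same asymptotic cost).

-- ===== PORT A =====
-- module constants (shared by both Pythons)
def pvSubjects : List String :=
  ["leadership", "leaders", "finance", "finance team", "product team",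
   "product managers", "operations", "operations team", "the business",
   "business", "executives", "management", "the team", "our team",
   "analytics team", "data team", "sales team", "marketing team",
   "the org", "the organization"]

def pvVerbs : List String :=
  [" needs ", " need ", " requires ", " require ", " wants ", " want "]

def pvCaps : List String :=
  ["visibility", "reporting", "dashboard", "dashboards", "report",
   "reports", "tracking", "insight", "insights", "monitoring", "metrics",
   "kpis", "pipeline", "feed", "integration", "workflow", "extract",
   "view", "dataset", "model", "scorecard", "analysis", "breakdown",
   "summary", "access", "performance"]

def pvQuestionStarters : List String :=
  ["what ", "how ", "why ", "when ", "where ", "who ", "which ",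
   "is ", "are ", "do ", "does ", "did ", "can ", "could ", "should ",
   "would ", "will "]

-- _normalize (module helper of A); `text or ""` is the identity on str ("" stays "")
def pvNormalize (text : String) : String :=
  PySem.Str.join " " (PySem.Str.split₀ (PySem.Str.strip (PySem.Str.lower text)))

-- A: nested loops — subject prefix, then need-verb prefix of the remainder, then capability substring
def looks_like_stakeholder_requirement_py (text : String) : Bool :=
  let normalized := pvNormalize text
  if PySem.Str.endswith normalized "?" then false
  else if pvQuestionStarters.any (fun qs => PySem.Str.startswith normalized qs) then false
  else
    pvSubjects.any (fun subject =>
      PySem.Str.startswith normalized subject &&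
        (let remainder := PySem.Str.slice normalized (some (PySem.Str.len subject)) none
         pvVerbs.any (fun verb =>
           PySem.Str.startswith remainder verb &&
             (let after_verb := PySem.Str.slice remainder (some (PySem.Str.len verb)) none
              pvCaps.any (fun cap => PySem.Str.isIn cap after_verb)))))

-- ===== PORT B =====
-- B's word sets (_QUESTION_WORDS, _NEED_WORDS; _SUBJECT_SET is frozenset(STAKEHOLDER_SUBJECTS),
-- i.e. the elements of pvSubjects; frozenset membership is ported as list membership)
def pvQWords : List String :=
  ["what", "how", "why", "when", "where", "who", "which",
   "is", "are", "do", "does", "did", "can", "could", "should",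
   "would", "will"]

def pvNeedWords : List String := ["needs", "need", "requires", "require", "wants", "want"]

-- B: words = (text or "").lower().strip().split(); guards on words[-1]/words[0];
-- one loop over verb positions j with set membership and joined slices
def looks_like_stakeholder_requirement_py_alt (text : String) : Bool :=
  let words := PySem.Str.split₀ (PySem.Str.strip (PySem.Str.lower text))
  if words.isEmpty then false
  else if PySem.Str.endswith (PySem.List.pyGetD words (-1) "") "?" then false
  else if decide (2 ≤ words.length) && pvQWords.contains (PySem.List.pyGetD words 0 "") then false
  else
    (PySem.List.pyRange 1 ((words.length : Int) - 1) 1).any (fun j =>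
      pvNeedWords.contains (PySem.List.pyGetD words j "") &&
      pvSubjects.contains (PySem.Str.join " " (PySem.List.slice words none (some j))) &&
      pvCaps.any (fun cap =>
        PySem.Str.isIn cap (PySem.Str.join " " (PySem.List.slice words (some (j + 1)) none))))

-- ===== PRECONDITION & SPEC =====
def Spec_looks_like_stakeholder_requirement_py (text : String) (out : Bool) : Prop := out = looks_like_stakeholder_requirement_py_alt text
instance (text : String) (out : Bool) : Decidable (Spec_looks_like_stakeholder_requirement_py text out) := by unfold Spec_looks_like_stakeholder_requirement_py; infer_instance

-- ===== CLAIM (what is proved, stated in full; the proofs are below) =====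
def Claim_equal_looks_like_stakeholder_requirement_py : Prop := ∀ (text : String), Dom_looks_like_stakeholder_requirement_py text → Spec_looks_like_stakeholder_requirement_py text (looks_like_stakeholder_requirement_py text)

-- ===== LEMMAS AND PROOFS =====

-- every word produced by str.split() is nonempty and whitespace-free
def pvTokOK (ws : List (List Char)) : Prop :=
  ∀ w ∈ ws, w ≠ [] ∧ ∀ c ∈ w, PySem.Chars.isspace c = false

theorem pv_go_tokens (s : List Char) : ∀ (cur : List Char) (acc : List (List Char)),
    (∀ w ∈ acc, w ≠ [] ∧ ∀ c ∈ w, PySem.Chars.isspace c = false) →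
    (∀ c ∈ cur, PySem.Chars.isspace c = false) →
    ∀ w ∈ PySem.Chars.split₀.go s cur acc, w ≠ [] ∧ ∀ c ∈ w, PySem.Chars.isspace c = false := by
  induction s with
  | nil =>
    intro cur acc hacc hcur w hw
    rw [PySem.Chars.split₀.go] at hw
    by_cases hc : cur.isEmpty
    · simp [hc] at hw
      exact hacc w hw
    · simp [hc] at hw
      rcases hw with hw | hw
      · exact hacc w hw
      · subst hw
        refine ⟨by simpa [List.isEmpty_iff] using hc, ?_⟩
        intro c hcm
        exact hcur c (by simpa using hcm)
  | cons c rest ih =>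
    intro cur acc hacc hcur w hw
    rw [PySem.Chars.split₀.go] at hw
    by_cases hsp : PySem.Chars.isspace c
    · by_cases hc : cur.isEmpty
      · simp [hsp, hc] at hw
        exact ih [] acc hacc (by simp) w hw
      · simp [hsp, hc] at hw
        refine ih [] (cur.reverse :: acc) ?_ (by simp) w hw
        intro w' hw'
        rcases List.mem_cons.mp hw' with rfl | hw'
        · refine ⟨by simpa [List.isEmpty_iff] using hc, ?_⟩
          intro c' hcm
          exact hcur c' (by simpa using hcm)
        · exact hacc w' hw'
    · simp [hsp] at hw
      refine ih (c :: cur) acc hacc ?_ w hw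
      intro c' hcm
      rcases List.mem_cons.mp hcm with rfl | hcm
      · simpa using hsp
      · exact hcur c' hcm

theorem pv_split₀_tokens (s : List Char) : pvTokOK (PySem.Chars.split₀ s) := by
  rw [PySem.Chars.split₀]
  exact pv_go_tokens s [] [] (by simp) (by simp)

-- intercalate over a nonempty tail: one separator then the rest
theorem pv_interc_cons (a : List Char) (l : List (List Char)) (hl : l ≠ []) :
    List.intercalate [' '] (a :: l) = a ++ ' ' :: List.intercalate [' '] l := by
  obtain ⟨b, t, rfl⟩ := List.exists_cons_of_ne_nil hl
  simp [List.intercalate, List.intersperse]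

theorem pv_interc_append (u v : List (List Char)) (hu : u ≠ []) (hv : v ≠ []) :
    List.intercalate [' '] (u ++ v)
      = List.intercalate [' '] u ++ ' ' :: List.intercalate [' '] v := by
  induction u with
  | nil => simp at hu
  | cons a u ih =>
    cases u with
    | nil => simpa [List.intercalate] using pv_interc_cons a v hv
    | cons b t =>
      rw [List.cons_append, pv_interc_cons a ((b::t) ++ v) (by simp),
        pv_interc_cons a (b::t) (by simp), ih (by simp)]
      simp

theorem pv_tok_no_space (ws : List (List Char)) (H : pvTokOK ws) (w : List Char)
    (hw : w ∈ ws) : ' ' ∉ w := by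
  intro hsp
  have := (H w hw).2 ' ' hsp
  simp [PySem.Chars.isspace] at this

theorem pv_interc_ne_nil (ws : List (List Char)) (H : pvTokOK ws) (h : ws ≠ []) :
    List.intercalate [' '] ws ≠ [] := by
  obtain ⟨a, t, rfl⟩ := List.exists_cons_of_ne_nil h
  cases t with
  | nil => simpa [List.intercalate] using (H a (by simp)).1
  | cons b t' =>
    rw [pv_interc_cons a _ (by simp)]
    intro hc
    have := (H a (by simp)).1
    simp at hc

theorem pv_interc_getLast? (ws : List (List Char)) (H : pvTokOK ws) (hne : ws ≠ []) :
    (List.intercalate [' '] ws).getLast? = (ws.getLast hne).getLast? := by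
  induction ws with
  | nil => simp at hne
  | cons a t ih =>
    cases t with
    | nil => simp [List.intercalate]
    | cons b t' =>
      rw [pv_interc_cons a _ (by simp), List.getLast_cons (by simp)]
      have htok : pvTokOK (b :: t') := fun w hw => H w (List.mem_cons_of_mem _ hw)
      rw [← ih htok (by simp)]
      have hnn : List.intercalate [' '] (b :: t') ≠ [] := pv_interc_ne_nil _ htok (by simp)
      rw [List.getLast?_append]
      cases hgl : (List.intercalate [' '] (b :: t')).getLast? with
      | none => exact absurd (List.getLast?_eq_none_iff.mp hgl) hnn
      | some c => rw [List.getLast?_cons]; simp [hgl]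

-- a space-free run after a space is uniquely positioned
theorem pv_first_space (x : List Char) : ∀ (y a b : List Char), ' ' ∉ x → ' ' ∉ y →
    x ++ ' ' :: a = y ++ ' ' :: b → x = y ∧ a = b := by
  induction x with
  | nil =>
    intro y a b _ hy h
    cases y with
    | nil => simpa using h
    | cons d y' =>
      simp at h hy
      exact absurd h.1 (by simpa using hy.1)
  | cons c x' ih =>
    intro y a b hx hy h
    cases y with
    | nil =>
      simp at h hx
      exact absurd h.1.symm (by simpa using hx.1)
    | cons d y' =>
      simp at h hx hy
      obtain ⟨rfl, h2⟩ := h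
      obtain ⟨h3, h4⟩ := ih y' a b (by simpa using hx.2) (by simpa using hy.2) h2
      exact ⟨by rw [h3], h4⟩

theorem pv_last_space (a b x y : List Char) (hx : ' ' ∉ x) (hy : ' ' ∉ y)
    (h : a ++ ' ' :: x = b ++ ' ' :: y) : a = b ∧ x = y := by
  have h' : x.reverse ++ ' ' :: a.reverse = y.reverse ++ ' ' :: b.reverse := by
    have := congrArg List.reverse h
    simpa [List.reverse_append] using this
  obtain ⟨h1, h2⟩ := pv_first_space x.reverse y.reverse a.reverse b.reverse
    (by simpa using hx) (by simpa using hy) h'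
  constructor
  · exact List.reverse_injective (by simpa using h2)
  · exact List.reverse_injective (by simpa using h1)

-- prefixes of an intercalation that end in a space are exactly the word-boundary prefixes
theorem pv_prefix_boundary (ws : List (List Char)) (H : pvTokOK ws) (p : List Char) :
    ((p ++ [' ']) <+: List.intercalate [' '] ws ↔
      ∃ u v, ws = u ++ v ∧ u ≠ [] ∧ v ≠ [] ∧ p = List.intercalate [' '] u) := by
  constructor
  · induction ws generalizing p with
    | nil =>
      intro h
      simp [List.intercalate] at h
    | cons w rest ih =>
      intro h
      cases rest with
      | nil =>
        simp [List.intercalate] at h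
        have hsp : ' ' ∈ w := h.mem (by simp)
        exact absurd hsp (pv_tok_no_space _ H w (by simp))
      | cons b t =>
        rw [pv_interc_cons w _ (by simp)] at h
        have hw' : (w ++ [' ']) <+: w ++ ' ' :: List.intercalate [' '] (b :: t) :=
          ⟨List.intercalate [' '] (b :: t), by simp⟩
        have hwn : w <+: w ++ ' ' :: List.intercalate [' '] (b :: t) := ⟨_, rfl⟩
        rcases Nat.lt_trichotomy p.length w.length with hlt | heq | hgt
        · have hp : (p ++ [' ']) <+: w :=
            List.prefix_of_prefix_length_le h hwn (by simp; omega)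
          have hsp : ' ' ∈ w := hp.mem (by simp)
          exact absurd hsp (pv_tok_no_space _ H w (by simp))
        · have hpw : p ++ [' '] <+: w ++ [' '] :=
            List.prefix_of_prefix_length_le h hw' (by simp [heq])
          have heq2 : p ++ [' '] = w ++ [' '] :=
            List.IsPrefix.eq_of_length hpw (by simp [heq])
          have hp : p = w := by simpa using heq2
          exact ⟨[w], b :: t, by simp, by simp, by simp, by simp [List.intercalate, hp]⟩
        · have hwp : w ++ [' '] <+: p ++ [' '] :=
            List.prefix_of_prefix_length_le hw' h (by simp; omega)
          have hwp2 : w ++ [' '] <+: p :=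
            List.prefix_of_prefix_length_le hwp (⟨[' '], rfl⟩ : p <+: p ++ [' '])
              (by simp; omega)
          rcases hwp2 with ⟨p', rfl⟩
          have hrec : p' ++ [' '] <+: List.intercalate [' '] (b :: t) := by
            rw [show (w ++ [' ']) ++ p' ++ [' '] = (w ++ [' ']) ++ (p' ++ [' ']) by simp,
              show w ++ ' ' :: List.intercalate [' '] (b :: t)
                = (w ++ [' ']) ++ List.intercalate [' '] (b :: t) by simp] at h
            exact (List.prefix_append_right_inj _).mp h
          have Hrest : pvTokOK (b :: t) := fun x hx => H x (List.mem_cons_of_mem _ hx)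
          obtain ⟨u, v, hws, hu, hv, hp⟩ := ih Hrest p' hrec
          refine ⟨w :: u, v, by simp [hws], by simp, hv, ?_⟩
          rw [pv_interc_cons w u hu, hp]
          simp
  · rintro ⟨u, v, hws, hu, hv, rfl⟩
    rw [hws, pv_interc_append u v hu hv]
    exact ⟨List.intercalate [' '] v, by simp⟩

-- a space-free word followed by a space is a prefix iff it is the first of ≥ 2 words
theorem pv_qword_prefix (ws : List (List Char)) (H : pvTokOK ws) (q : List Char)
    (hq2 : ' ' ∉ q) :
    (q ++ [' ']) <+: List.intercalate [' '] ws ↔ 2 ≤ ws.length ∧ ws.headD [] = q := by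
  rw [pv_prefix_boundary ws H q]
  constructor
  · rintro ⟨u, v, rfl, hu, hv, rfl⟩
    cases u with
    | nil => simp at hu
    | cons a u' =>
      cases u' with
      | nil =>
        refine ⟨?_, by simp [List.intercalate]⟩
        have : 1 ≤ v.length := List.length_pos_of_ne_nil hv
        simp; omega
      | cons b t =>
        exfalso
        apply hq2
        rw [pv_interc_cons a _ (by simp)]
        simp
  · rintro ⟨hlen, hhead⟩
    cases ws with
    | nil => simp at hlen
    | cons a rest =>
      cases rest with
      | nil => simp at hlen
      | cons b t =>
        refine ⟨[a], b :: t, by simp, by simp, by simp, ?_⟩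
        simp at hhead
        simp [List.intercalate, hhead]

-- "subject + ' ' + verb word + ' '" prefixes correspond to verb positions j
theorem pv_needverb_prefix (ws : List (List Char)) (H : pvTokOK ws) (s vw : List Char)
    (hvw : ' ' ∉ vw) :
    ((s ++ ' ' :: vw) ++ [' ']) <+: List.intercalate [' '] ws ↔
      ∃ j : Nat, 1 ≤ j ∧ j + 1 < ws.length ∧
        s = List.intercalate [' '] (ws.take j) ∧ ws.getD j [] = vw := by
  rw [pv_prefix_boundary ws H (s ++ ' ' :: vw)]
  constructor
  · rintro ⟨u, v, rfl, hu, hv, hp⟩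
    rcases (List.eq_nil_or_concat u).resolve_left hu with ⟨u', lw, rfl⟩
    simp only [List.concat_eq_append] at hp hu H ⊢
    cases u' with
    | nil =>
      exfalso
      apply pv_tok_no_space _ H lw (by simp)
      simp [List.intercalate] at hp
      rw [← hp]
      simp
    | cons a t =>
      rw [pv_interc_append (a :: t) [lw] (by simp) (by simp)] at hp
      have hlw : ' ' ∉ lw := pv_tok_no_space _ H lw (by simp)
      obtain ⟨h1, h2⟩ := pv_last_space s (List.intercalate [' '] (a :: t)) vw lw hvw hlw
        (by simpa [List.intercalate] using hp)
      refine ⟨(a :: t).length, by simp, ?_, ?_, ?_⟩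
      · have : 1 ≤ v.length := List.length_pos_of_ne_nil hv
        simp; omega
      · rw [List.append_assoc, List.take_left]
        exact h1
      · rw [List.append_assoc]
        simp [h2]
  · rintro ⟨j, hj1, hj2, hs, hvw2⟩
    refine ⟨ws.take j ++ [ws.getD j []], ws.drop (j + 1), ?_, by simp, ?_, ?_⟩
    · rw [List.append_assoc]
      have hjlt : j < ws.length := by omega
      rw [show ws.getD j [] = ws[j] by simp [List.getD, List.getElem?_eq_getElem hjlt]]
      rw [List.singleton_append, show (ws[j] :: ws.drop (j+1) : List (List Char)) = ws.drop j by
        rw [List.drop_eq_getElem_cons hjlt]]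
      simp
    · intro hc
      have := congrArg List.length hc
      simp at this
      omega
    · rw [pv_interc_append (ws.take j) [ws.getD j []] (by
        intro hc
        have h0 : (ws.take j).length = 0 := by rw [hc]; rfl
        rw [List.length_take] at h0
        omega) (by simp)]
      rw [← hs, hvw2]
      simp [List.intercalate]

theorem pv_tail_eq (ws : List (List Char)) (j : Nat)
    (h1 : 1 ≤ j) (h2 : j + 1 < ws.length) :
    (List.intercalate [' '] ws).drop
        ((List.intercalate [' '] (ws.take j)).length + (ws.getD j []).length + 2)
      = List.intercalate [' '] (ws.drop (j + 1)) := by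
  have hjlt : j < ws.length := by omega
  have hsplit : ws = (ws.take j ++ [ws.getD j []]) ++ ws.drop (j + 1) := by
    rw [List.append_assoc, show ws.getD j [] = ws[j] by
      simp [List.getD, List.getElem?_eq_getElem hjlt]]
    rw [List.singleton_append, show (ws[j] :: ws.drop (j+1) : List (List Char)) = ws.drop j by
      rw [List.drop_eq_getElem_cons hjlt]]
    simp
  have htn : ws.take j ≠ [] := by
    intro hc
    have h0 : (ws.take j).length = 0 := by rw [hc]; rfl
    rw [List.length_take] at h0
    omega
  have hdn : ws.drop (j + 1) ≠ [] := by
    intro hc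
    have h0 : (ws.drop (j + 1)).length = 0 := by rw [hc]; rfl
    rw [List.length_drop] at h0
    omega
  have hexp : List.intercalate [' '] ws
      = (List.intercalate [' '] (ws.take j) ++ ' ' :: ws.getD j [])
          ++ ' ' :: List.intercalate [' '] (ws.drop (j + 1)) := by
    conv_lhs => rw [hsplit]
    rw [pv_interc_append _ _ (by simp [htn]) hdn,
      pv_interc_append (ws.take j) [ws.getD j []] htn (by simp)]
    rw [show List.intercalate [' '] [ws.getD j []] = ws.getD j [] by simp [List.intercalate]]
  rw [hexp]
  rw [show (List.intercalate [' '] (ws.take j) ++ ' ' :: ws.getD j [])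
        ++ ' ' :: List.intercalate [' '] (ws.drop (j+1))
      = (List.intercalate [' '] (ws.take j) ++ ' ' :: ws.getD j [] ++ [' '])
        ++ List.intercalate [' '] (ws.drop (j+1)) by simp]
  rw [show (List.intercalate [' '] (ws.take j)).length + (ws.getD j []).length + 2
      = (List.intercalate [' '] (ws.take j) ++ ' ' :: ws.getD j [] ++ [' ']).length by
        simp; omega]
  exact List.drop_left

-- small bridges between the String list and its List Char image
theorem pv_suffix_singleton (l : List Char) (c : Char) :
    [c] <:+ l ↔ l.getLast? = some c := by
  rw [List.getLast?_eq_some_iff]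
  constructor
  · rintro ⟨t, rfl⟩; exact ⟨t, rfl⟩
  · rintro ⟨t, rfl⟩; exact ⟨t, rfl⟩

theorem pv_getD_toList (W : List String) (k : Nat) :
    (W.getD k "").toList = (W.map String.toList).getD k [] := by
  induction W generalizing k with
  | nil => simp
  | cons a t ih =>
    cases k with
    | zero => simp
    | succ m => simpa using ih m

theorem pv_headD_toList (W : List String) :
    (W.map String.toList).headD [] = (W.headD "").toList := by
  cases W <;> simp

theorem pv_prefix_append_iff (n a b : List Char) :
    (a ++ b <+: n) ↔ (a <+: n ∧ b <+: n.drop a.length) := by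
  constructor
  · rintro ⟨t, rfl⟩
    refine ⟨⟨b ++ t, by simp⟩, ?_⟩
    simp
  · rintro ⟨⟨t, rfl⟩, hb⟩
    simp at hb
    obtain ⟨u, rfl⟩ := hb
    exact ⟨u, by simp⟩

-- the common "hit at verb position j" predicate both cores are equivalent to
def pvHit (W : List String) (j : Nat) : Prop :=
  1 ≤ j ∧ j + 1 < W.length ∧
    (W.map String.toList).getD j [] ∈ pvNeedWords.map String.toList ∧
    (∃ s ∈ pvSubjects, s.toList = List.intercalate [' '] ((W.map String.toList).take j)) ∧
    (∃ cap ∈ pvCaps, PySem.Chars.isIn cap.toList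
        (List.intercalate [' '] ((W.map String.toList).drop (j + 1))) = true)

-- A's nested subject/verb scan hits iff some verb position hits
theorem pv_coreA_iff (W : List String) (H : pvTokOK (W.map String.toList)) :
    (pvSubjects.any (fun subject =>
      PySem.Str.startswith (PySem.Str.join " " W) subject &&
        (pvVerbs.any (fun verb =>
          PySem.Str.startswith (PySem.Str.slice (PySem.Str.join " " W)
              (some (PySem.Str.len subject)) none) verb &&
            (pvCaps.any (fun cap => PySem.Str.isIn cap
              (PySem.Str.slice (PySem.Str.slice (PySem.Str.join " " W)
                  (some (PySem.Str.len subject)) none)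
                (some (PySem.Str.len verb)) none))))))) = true
      ↔ ∃ j : Nat, pvHit W j := by
  have hVmap : pvVerbs.map String.toList
      = (pvNeedWords.map String.toList).map (fun vw => ' ' :: (vw ++ [' '])) := by decide
  have hnsp : ∀ vw ∈ pvNeedWords.map String.toList, ' ' ∉ vw := by decide
  have hN : (PySem.Str.join " " W).toList = List.intercalate [' '] (W.map String.toList) := by
    rw [PySem.Str.toList_join, PySem.Chars.join, show (" " : String).toList = [' '] from rfl]
  rw [List.any_eq_true]
  constructor
  · rintro ⟨subject, hsmem, hb⟩
    rw [Bool.and_eq_true] at hb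
    obtain ⟨hsw, hb2⟩ := hb
    rw [List.any_eq_true] at hb2
    obtain ⟨verb, hvmem, hb3⟩ := hb2
    rw [Bool.and_eq_true] at hb3
    obtain ⟨hvw, hcap⟩ := hb3
    obtain ⟨vw, hvwmem, hvweq⟩ := List.mem_map.mp (hVmap ▸ List.mem_map_of_mem hvmem)
    have hs' : subject.toList <+: List.intercalate [' '] (W.map String.toList) := by
      rw [← hN, ← PySem.Chars.startswith_iff]
      simpa using hsw
    have hv' : verb.toList
        <+: (List.intercalate [' '] (W.map String.toList)).drop subject.toList.length := by
      rw [← PySem.Chars.startswith_iff]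
      have := hvw
      simp only [PySem.Str.startswith_eq, PySem.Str.toList_slice, PySem.Chars.slice_eq_listSlice,
        PySem.Str.len_eq, PySem.List.slice_from_natCast, hN] at this
      exact this
    have hfull : (subject.toList ++ verb.toList)
        <+: List.intercalate [' '] (W.map String.toList) :=
      (pv_prefix_append_iff _ _ _).mpr ⟨hs', hv'⟩
    rw [← hvweq, show subject.toList ++ ' ' :: (vw ++ [' '])
        = (subject.toList ++ ' ' :: vw) ++ [' '] by simp] at hfull
    obtain ⟨j, hj1, hj2, hsj, hvj⟩ :=
      (pv_needverb_prefix (W.map String.toList) H subject.toList vw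
        (hnsp _ hvwmem)).mp hfull
    refine ⟨j, hj1, by simpa using hj2, by rw [hvj]; exact hvwmem, ⟨subject, hsmem, hsj⟩, ?_⟩
    rw [List.any_eq_true] at hcap
    obtain ⟨cap, hcm, hci⟩ := hcap
    refine ⟨cap, hcm, ?_⟩
    simp only [PySem.Str.isIn_eq, PySem.Str.toList_slice, PySem.Chars.slice_eq_listSlice,
      PySem.Str.len_eq, PySem.List.slice_from_natCast, hN, List.drop_drop] at hci
    rw [show subject.toList.length + verb.toList.length
        = (List.intercalate [' '] ((W.map String.toList).take j)).length
          + ((W.map String.toList).getD j []).length + 2 by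
      rw [← hsj, hvj, ← hvweq]; simp; omega] at hci
    rw [pv_tail_eq (W.map String.toList) j hj1 (by simpa using hj2)] at hci
    exact hci
  · rintro ⟨j, hj1, hj2, hneed, ⟨subject, hsmem, hse⟩, ⟨cap, hcm, hci⟩⟩
    have hws2 : j + 1 < (W.map String.toList).length := by simpa using hj2
    obtain ⟨verb, hvmem, hveq⟩ := List.mem_map.mp (hVmap.symm ▸ List.mem_map_of_mem
      (f := fun vw => ' ' :: (vw ++ [' '])) hneed)
    have hfull := (pv_needverb_prefix (W.map String.toList) H subject.toList
      ((W.map String.toList).getD j []) (hnsp _ hneed)).mpr ⟨j, hj1, hws2, hse, rfl⟩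
    rw [show (subject.toList ++ ' ' :: (W.map String.toList).getD j []) ++ [' ']
        = subject.toList ++ (' ' :: ((W.map String.toList).getD j [] ++ [' '])) by simp,
      ← hveq] at hfull
    obtain ⟨hs', hv'⟩ := (pv_prefix_append_iff _ _ _).mp hfull
    refine ⟨subject, hsmem, ?_⟩
    rw [Bool.and_eq_true]
    refine ⟨?_, ?_⟩
    · rw [PySem.Str.startswith_eq, PySem.Chars.startswith_iff, hN]
      exact hs'
    · rw [List.any_eq_true]
      refine ⟨verb, hvmem, ?_⟩
      rw [Bool.and_eq_true]
      refine ⟨?_, ?_⟩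
      · simp only [PySem.Str.startswith_eq, PySem.Str.toList_slice,
          PySem.Chars.slice_eq_listSlice, PySem.Str.len_eq, PySem.List.slice_from_natCast, hN]
        rw [PySem.Chars.startswith_iff]
        exact hv'
      · rw [List.any_eq_true]
        refine ⟨cap, hcm, ?_⟩
        simp only [PySem.Str.isIn_eq, PySem.Str.toList_slice, PySem.Chars.slice_eq_listSlice,
          PySem.Str.len_eq, PySem.List.slice_from_natCast, hN, List.drop_drop]
        rw [show subject.toList.length + verb.toList.length
            = (List.intercalate [' '] ((W.map String.toList).take j)).length
              + ((W.map String.toList).getD j []).length + 2 by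
          rw [← hse, hveq]; simp; omega]
        rw [pv_tail_eq (W.map String.toList) j hj1 hws2]
        exact hci

-- B's position loop hits iff some verb position hits
theorem pv_coreB_iff (W : List String) :
    ((PySem.List.pyRange 1 ((W.length : Int) - 1) 1).any (fun j =>
      pvNeedWords.contains (PySem.List.pyGetD W j "") &&
      pvSubjects.contains (PySem.Str.join " " (PySem.List.slice W none (some j))) &&
      pvCaps.any (fun cap =>
        PySem.Str.isIn cap (PySem.Str.join " " (PySem.List.slice W (some (j + 1)) none))))) = true
      ↔ ∃ j : Nat, pvHit W j := by
  rw [List.any_eq_true]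
  constructor
  · rintro ⟨j, hj, hf⟩
    rw [PySem.List.mem_pyRange_one] at hj
    obtain ⟨hj1, hj2⟩ := hj
    have hjk : j = ((j.toNat : Nat) : Int) := by omega
    rw [Bool.and_eq_true, Bool.and_eq_true] at hf
    obtain ⟨⟨hneed, hsub⟩, hcap⟩ := hf
    refine ⟨j.toNat, by omega, by omega, ?_, ?_, ?_⟩
    · rw [hjk, PySem.List.pyGetD_natCast] at hneed
      rw [← pv_getD_toList]
      exact List.mem_map_of_mem (List.contains_iff_mem.mp hneed)
    · rw [hjk, PySem.List.slice_to_natCast] at hsub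
      refine ⟨_, List.contains_iff_mem.mp hsub, ?_⟩
      rw [PySem.Str.toList_join, PySem.Chars.join,
        show (" " : String).toList = [' '] from rfl, List.map_take]
    · rw [List.any_eq_true] at hcap
      obtain ⟨cap, hcm, hci⟩ := hcap
      refine ⟨cap, hcm, ?_⟩
      rw [hjk, show ((j.toNat : Nat) : Int) + 1 = ((j.toNat + 1 : Nat) : Int) by push_cast; ring,
        PySem.List.slice_from_natCast] at hci
      rw [PySem.Str.isIn_eq, PySem.Str.toList_join, PySem.Chars.join,
        show (" " : String).toList = [' '] from rfl, List.map_drop] at hci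
      exact hci
  · rintro ⟨k, hk1, hk2, hneed, ⟨s, hs, hse⟩, ⟨cap, hcm, hci⟩⟩
    refine ⟨(k : Int), ?_, ?_⟩
    · rw [PySem.List.mem_pyRange_one]
      constructor <;> [omega; omega]
    · rw [Bool.and_eq_true, Bool.and_eq_true]
      refine ⟨⟨?_, ?_⟩, ?_⟩
      · rw [PySem.List.pyGetD_natCast, List.contains_iff_mem]
        rw [← pv_getD_toList] at hneed
        obtain ⟨y, hy, he⟩ := List.mem_map.mp hneed
        exact String.toList_inj.mp he.symm ▸ hy
      · rw [PySem.List.slice_to_natCast, List.contains_iff_mem]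
        have : s = PySem.Str.join " " (W.take k) := by
          apply String.toList_inj.mp
          rw [hse, PySem.Str.toList_join, PySem.Chars.join,
            show (" " : String).toList = [' '] from rfl, List.map_take]
        exact this ▸ hs
      · rw [List.any_eq_true]
        refine ⟨cap, hcm, ?_⟩
        rw [show ((k : Nat) : Int) + 1 = ((k + 1 : Nat) : Int) by push_cast; ring,
          PySem.List.slice_from_natCast]
        rw [PySem.Str.isIn_eq, PySem.Str.toList_join, PySem.Chars.join,
          show (" " : String).toList = [' '] from rfl, List.map_drop]
        exact hci

-- the two guard tests agree
theorem pv_guard1 (W : List String) (H : pvTokOK (W.map String.toList)) (hne : W ≠ []) :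
    PySem.Str.endswith (PySem.Str.join " " W) "?"
      = PySem.Str.endswith (PySem.List.pyGetD W (-1) "") "?" := by
  rw [PySem.List.pyGetD_neg_one W "" hne]
  rw [Bool.eq_iff_iff]
  simp only [PySem.Str.endswith_eq, PySem.Str.toList_join, PySem.Chars.join]
  rw [show (" " : String).toList = [' '] from rfl, show ("?" : String).toList = ['?'] from rfl]
  rw [PySem.Chars.endswith_iff, PySem.Chars.endswith_iff,
    pv_suffix_singleton, pv_suffix_singleton]
  rw [pv_interc_getLast? (W.map String.toList) H (by simpa using hne)]
  rw [List.getLast_map]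

theorem pv_guard2 (W : List String) (H : pvTokOK (W.map String.toList)) :
    pvQuestionStarters.any (fun qs => PySem.Str.startswith (PySem.Str.join " " W) qs)
      = (decide (2 ≤ W.length) && pvQWords.contains (PySem.List.pyGetD W 0 "")) := by
  have hqsp : ∀ q ∈ pvQWords.map String.toList, ' ' ∉ q := by decide
  have hmap : pvQuestionStarters.map String.toList
      = (pvQWords.map String.toList).map (fun q => q ++ [' ']) := by decide
  rw [Bool.eq_iff_iff]
  constructor
  · intro h
    rw [List.any_eq_true] at h
    obtain ⟨qs, hqs, hsw⟩ := h
    have hq' : qs.toList ∈ pvQuestionStarters.map String.toList :=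
      List.mem_map_of_mem hqs
    rw [hmap] at hq'
    obtain ⟨q, hq, heq⟩ := List.mem_map.mp hq'
    have hpre : qs.toList <+: (PySem.Str.join " " W).toList := by
      rw [← PySem.Chars.startswith_iff]
      simpa using hsw
    rw [← heq, PySem.Str.toList_join, PySem.Chars.join,
      show (" " : String).toList = [' '] from rfl] at hpre
    obtain ⟨hl, hh⟩ := (pv_qword_prefix (W.map String.toList) H q (hqsp q hq)).mp hpre
    rw [Bool.and_eq_true, decide_eq_true_iff]
    refine ⟨by simpa using hl, ?_⟩
    rw [List.contains_iff_mem, PySem.List.pyGetD_zero]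
    rw [pv_headD_toList] at hh
    obtain ⟨q0, hq0, hq0e⟩ := List.mem_map.mp hq
    rw [← hq0e] at hh
    have : W.headD "" = q0 := String.toList_inj.mp hh
    rw [show W.getD 0 "" = W.headD "" by cases W <;> rfl, this]
    exact hq0
  · intro h
    rw [Bool.and_eq_true, decide_eq_true_iff, List.contains_iff_mem,
      PySem.List.pyGetD_zero] at h
    obtain ⟨hl, hmem⟩ := h
    have hq' : (W.getD 0 "").toList ++ [' ']
        ∈ (pvQWords.map String.toList).map (fun q => q ++ [' ']) :=
      List.mem_map_of_mem (List.mem_map_of_mem hmem)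
    rw [← hmap] at hq'
    obtain ⟨qs, hqs, heq⟩ := List.mem_map.mp hq'
    rw [List.any_eq_true]
    refine ⟨qs, hqs, ?_⟩
    have hpre : ((W.getD 0 "").toList ++ [' ']) <+: List.intercalate [' '] (W.map String.toList) := by
      rw [pv_qword_prefix (W.map String.toList) H _ (hqsp _ (List.mem_map_of_mem hmem))]
      refine ⟨by simpa using hl, ?_⟩
      rw [pv_headD_toList, show W.getD 0 "" = W.headD "" by cases W <;> rfl]
    rw [← heq] at hpre
    rw [PySem.Str.startswith_eq, PySem.Chars.startswith_iff, PySem.Str.toList_join,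
      PySem.Chars.join, show (" " : String).toList = [' '] from rfl]
    exact hpre

-- the whole bodies agree, for any word list with split()-shaped tokens
theorem pv_main (W : List String) (H : pvTokOK (W.map String.toList)) :
    (if PySem.Str.endswith (PySem.Str.join " " W) "?" then false
     else if pvQuestionStarters.any (fun qs =>
         PySem.Str.startswith (PySem.Str.join " " W) qs) then false
     else
       pvSubjects.any (fun subject =>
         PySem.Str.startswith (PySem.Str.join " " W) subject &&
           (pvVerbs.any (fun verb =>
             PySem.Str.startswith (PySem.Str.slice (PySem.Str.join " " W)
                 (some (PySem.Str.len subject)) none) verb &&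
               (pvCaps.any (fun cap => PySem.Str.isIn cap
                 (PySem.Str.slice (PySem.Str.slice (PySem.Str.join " " W)
                     (some (PySem.Str.len subject)) none)
                   (some (PySem.Str.len verb)) none)))))))
    = (if W.isEmpty then false
       else if PySem.Str.endswith (PySem.List.pyGetD W (-1) "") "?" then false
       else if decide (2 ≤ W.length) && pvQWords.contains (PySem.List.pyGetD W 0 "") then false
       else
         (PySem.List.pyRange 1 ((W.length : Int) - 1) 1).any (fun j =>
           pvNeedWords.contains (PySem.List.pyGetD W j "") &&
           pvSubjects.contains (PySem.Str.join " " (PySem.List.slice W none (some j))) &&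
           pvCaps.any (fun cap =>
             PySem.Str.isIn cap (PySem.Str.join " " (PySem.List.slice W (some (j + 1)) none))))) := by
  cases W with
  | nil => decide
  | cons w rest =>
    have hne : (w :: rest) ≠ [] := by simp
    rw [show (w :: rest).isEmpty = false from rfl]
    rw [pv_guard1 _ H hne, pv_guard2 _ H]
    cases h1 : PySem.Str.endswith (PySem.List.pyGetD (w :: rest) (-1) "") "?" with
    | true => simp
    | false =>
      simp only [Bool.false_eq_true, if_false]
      cases h2 : (decide (2 ≤ (w :: rest).length)
          && pvQWords.contains (PySem.List.pyGetD (w :: rest) 0 "")) with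
      | true => simp
      | false =>
        simp only [Bool.false_eq_true, if_false]
        rw [Bool.eq_iff_iff, pv_coreA_iff _ H, pv_coreB_iff _]

-- ===== VERDICT (by name: the statement is the Claim_ definition above) =====
theorem looks_like_stakeholder_requirement_py_spec : Claim_equal_looks_like_stakeholder_requirement_py := by
  intro text _
  unfold Spec_looks_like_stakeholder_requirement_py
  have H : pvTokOK ((PySem.Str.split₀ (PySem.Str.strip (PySem.Str.lower text))).map
      String.toList) := by
    rw [PySem.Str.split₀_map_toList]
    exact pv_split₀_tokens _
  exact pv_main (PySem.Str.split₀ (PySem.Str.strip (PySem.Str.lower text))) H
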